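-- pv_equiv track=rewrite | github.com/sumwor/matching_pennies | python/matchpennies/readtxt.py | choice_counting
-- ===== SOURCE A (Python) =====
-- def choice_counting(choiceHistory, num):
--
--     leftCount=0
--     rightCount=0
--
--     if num==0:
--         for i in range(len(choiceHistory)):
--             if choiceHistory[i] == '2':
--                 leftCount+=1
--             else:
--                 rightCount+=1
--     else:
--         comb=choiceHistory[-num:]
--
--
--         for i in range(len(choiceHistory)-num):
--             if choiceHistory[i:i+num] == comb:
--                 if choiceHistory[i+num] == '2':
--                     leftCount+=1
--                 else:
--                     rightCount+=1
--
--     return leftCount, rightCount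
-- ===== SOURCE B (Python) =====
-- def choice_counting(choiceHistory, num):
--     # jump between occurrences of the suffix pattern with str.find, trying the
--     # current position first with str.startswith (cheap when occurrences are dense),
--     # and check only the character following each occurrence
--     if num == 0:
--         leftCount = choiceHistory.count('2')
--         return leftCount, len(choiceHistory) - leftCount
--     comb = choiceHistory[-num:]
--     n = len(choiceHistory)
--     leftCount = 0
--     rightCount = 0
--     start = 0
--     while True:
--         if choiceHistory.startswith(comb, start):
--             i = start
--         else:
--             i = choiceHistory.find(comb, start)
--         if i == -1 or i + num >= n:
--             break
--         if choiceHistory[i + num] == '2':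
--             leftCount += 1
--         else:
--             rightCount += 1
--         start = i + 1
--     return leftCount, rightCount
-- ===== Notes on version B (the rewrite author's own statement) =====
-- stated objective: alternative
-- what changed: Instead of slicing out and comparing a fresh num-length substring at every position, B jumps between occurrences of the suffix pattern (str.startswith at the current position, else str.find), and uses str.count for num==0, checking only the character after each occurrence.
-- outside the precondition, e.g. on choice_counting('abc', -1): A returns (0, 0), B returns (0, 1); on choice_counting('1', -2): A raises IndexError, B raises IndexError
import Mathlib
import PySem

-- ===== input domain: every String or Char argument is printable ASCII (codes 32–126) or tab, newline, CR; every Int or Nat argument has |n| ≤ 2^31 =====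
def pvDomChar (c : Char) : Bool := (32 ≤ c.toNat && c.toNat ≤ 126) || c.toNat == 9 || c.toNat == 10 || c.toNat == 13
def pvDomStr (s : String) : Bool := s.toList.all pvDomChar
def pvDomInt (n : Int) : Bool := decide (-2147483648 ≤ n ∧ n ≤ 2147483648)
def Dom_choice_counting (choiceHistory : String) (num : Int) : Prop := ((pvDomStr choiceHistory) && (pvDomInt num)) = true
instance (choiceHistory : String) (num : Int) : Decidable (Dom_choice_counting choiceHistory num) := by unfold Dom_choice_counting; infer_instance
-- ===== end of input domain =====

-- B replaces A's slice-compare-at-every-position loop by jumps between pattern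
-- occurrences found with str.find (and str.count for num == 0): a different scan
-- structure; return value only (neither program mutates its arguments).


-- ===== PORT A =====
def choice_counting (choiceHistory : String) (num : Int) : List Int :=
  let cs := choiceHistory.toList
  if num == 0 then
    let p := (PySem.List.pyRange 0 (cs.length : Int) 1).foldl
      (fun (p : Int × Int) i =>
        if PySem.List.pyGetD cs i ' ' == '2' then (p.1 + 1, p.2) else (p.1, p.2 + 1))
      (0, 0)
    [p.1, p.2]
  else
    let comb := PySem.List.slice cs (some (-num)) none
    let p := (PySem.List.pyRange 0 ((cs.length : Int) - num) 1).foldl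
      (fun (p : Int × Int) i =>
        if PySem.List.slice cs (some i) (some (i + num)) == comb then
          (if PySem.List.pyGetD cs (i + num) ' ' == '2' then (p.1 + 1, p.2) else (p.1, p.2 + 1))
        else p)
      (0, 0)
    [p.1, p.2]

-- ===== PORT B =====
-- the while loop of Source B (str.startswith(comb, start) is ported as isPrefixOf on the
-- dropped list, exact for 0 <= start); fuel only makes the recursion structurally total
-- (the call site supplies enough fuel, proved in the lemmas below)
def ccAltLoop (cs comb : List Char) (num : Int) : Nat → Nat → Int → Int → Int × Int
  | 0, _, l, r => (l, r)
  | fuel + 1, start, l, r =>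
    let i := if comb.isPrefixOf (cs.drop start) then ((start : Nat) : Int)
             else PySem.Chars.findFrom cs comb (start : Int) none
    if i = -1 ∨ (cs.length : Int) ≤ i + num then (l, r)
    else if PySem.List.pyGetD cs (i + num) ' ' == '2' then
      ccAltLoop cs comb num fuel (i.toNat + 1) (l + 1) r
    else
      ccAltLoop cs comb num fuel (i.toNat + 1) l (r + 1)

def choice_counting_alt (choiceHistory : String) (num : Int) : List Int :=
  let cs := choiceHistory.toList
  if num == 0 then
    let leftCount : Int := (PySem.Chars.count cs ['2'] : Int)
    [leftCount, (cs.length : Int) - leftCount]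
  else
    let comb := PySem.List.slice cs (some (-num)) none
    let p := ccAltLoop cs comb num (cs.length + 1) 0 0 0
    [p.1, p.2]

-- ===== PRECONDITION & SPEC =====
-- Pre_ restricts to the natural domain num ≥ 0 (num is a pattern length): for negative
-- num, A's empty-slice comparisons and negative-index wraparound make it raise
-- IndexError or return an accidental value (e.g. (0, 0) on ('abc', -1)).
def Pre_choice_counting (choiceHistory : String) (num : Int) : Prop := 0 ≤ num
instance (choiceHistory : String) (num : Int) : Decidable (Pre_choice_counting choiceHistory num) := by unfold Pre_choice_counting; infer_instance
def pvWitness_choice_counting : String × Int := ("1212122", 2)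

def Spec_choice_counting (choiceHistory : String) (num : Int) (out : List Int) : Prop := out = choice_counting_alt choiceHistory num
instance (choiceHistory : String) (num : Int) (out : List Int) : Decidable (Spec_choice_counting choiceHistory num out) := by unfold Spec_choice_counting; infer_instance

-- ===== CLAIM (what is proved, stated in full; the proofs are below) =====
def Claim_equal_choice_counting : Prop := ∀ (choiceHistory : String) (num : Int), Dom_choice_counting choiceHistory num → Pre_choice_counting choiceHistory num → Spec_choice_counting choiceHistory num (choice_counting choiceHistory num)

-- ===== LEMMAS AND PROOFS =====

-- reference fold both sides are reduced to: positions js, count matches by successor char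
def ccRef (cs comb : List Char) (m : Nat) (js : List Nat) (l r : Int) : Int × Int :=
  js.foldl
    (fun p j =>
      if comb <+: cs.drop j then
        (if cs.getD (j + m) ' ' = '2' then (p.1 + 1, p.2) else (p.1, p.2 + 1))
      else p)
    (l, r)

theorem ccRef_of_no_match {cs comb : List Char} {m : Nat} {js : List Nat} {l r : Int}
    (h : ∀ j ∈ js, ¬ comb <+: cs.drop j) : ccRef cs comb m js l r = (l, r) := by
  unfold ccRef
  induction js with
  | nil => rfl
  | cons j t ih =>
    simp only [List.foldl_cons]
    rw [if_neg (h j (by simp))]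
    exact ih (fun x hx => h x (by simp [hx]))

theorem prefix_drop_infix {cs comb : List Char} {start j : Nat} (hj : start ≤ j)
    (h : comb <+: cs.drop j) : comb <:+: cs.drop start := by
  have hd : cs.drop j = (cs.drop start).drop (j - start) := by
    rw [List.drop_drop]; congr 1; omega
  rw [hd] at h
  exact h.isInfix.trans (List.drop_suffix _ _).isInfix

def ccNext (cs comb : List Char) (start : Nat) : Int :=
  if comb.isPrefixOf (cs.drop start) then ((start : Nat) : Int)
  else PySem.Chars.findFrom cs comb (start : Int) none

theorem ccAltLoop_succ (cs comb : List Char) (num : Int) (f start : Nat) (l r : Int) :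
    ccAltLoop cs comb num (f+1) start l r
      = (if ccNext cs comb start = -1
            ∨ (cs.length : Int) ≤ ccNext cs comb start + num then (l, r)
         else if PySem.List.pyGetD cs (ccNext cs comb start + num) ' ' == '2' then
           ccAltLoop cs comb num f ((ccNext cs comb start).toNat + 1) (l + 1) r
         else
           ccAltLoop cs comb num f ((ccNext cs comb start).toNat + 1) l (r + 1)) := rfl

-- ccNext behaves exactly like findFrom: -1 means no occurrence at or after start,
-- otherwise it is the first occurrence at or after start
theorem ccNext_eq_neg_one {cs comb : List Char} {start : Nat} (hs : start ≤ cs.length)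
    (h : ccNext cs comb start = -1) : ¬ comb <:+: cs.drop start := by
  unfold ccNext at h
  by_cases hsw : comb.isPrefixOf (cs.drop start)
  · rw [if_pos hsw] at h; omega
  · rw [if_neg hsw] at h
    exact (PySem.Chars.findFrom_natCast_eq_neg_one_iff cs comb start hs).mp h

theorem ccNext_spec {cs comb : List Char} {start : Nat} (hs : start ≤ cs.length)
    (h : ccNext cs comb start ≠ -1) :
    (start : Int) ≤ ccNext cs comb start
      ∧ comb <+: cs.drop (ccNext cs comb start).toNat
      ∧ ∀ j : Nat, start ≤ j → j < (ccNext cs comb start).toNat → ¬ comb <+: cs.drop j := by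
  unfold ccNext at *
  by_cases hsw : comb.isPrefixOf (cs.drop start)
  · rw [if_pos hsw] at *
    refine ⟨le_refl _, ?_, ?_⟩
    · simpa using List.isPrefixOf_iff_prefix.mp hsw
    · intro j h1 h2; simp at h2; omega
  · rw [if_neg hsw] at *
    exact PySem.Chars.findFrom_natCast_spec cs comb start hs h

theorem ccAltLoop_eq_ccRef (cs comb : List Char) (m : Nat) (hm : 0 < m)
    (hmn : m < cs.length) :
    ∀ fuel start l r, start ≤ cs.length → cs.length - start < fuel →
      ccAltLoop cs comb (m : Int) fuel start l r
        = ccRef cs comb m (List.range' start (cs.length - m - start)) l r := by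
  intro fuel
  induction fuel with
  | zero => intro start l r hs hf; omega
  | succ f ih =>
    intro start l r hs hf
    rw [ccAltLoop_succ]
    set i := ccNext cs comb start with hi
    by_cases h1 : i = -1 ∨ (cs.length : Int) ≤ i + (m : Int)
    · rw [if_pos h1]
      rcases h1 with h1 | h1
      · -- no occurrence at or after start
        have hno : ¬ comb <:+: cs.drop start := ccNext_eq_neg_one hs h1
        refine (ccRef_of_no_match ?_).symm
        intro j hj hpre
        obtain ⟨k, hk, hjk⟩ := List.mem_range'.mp hj
        exact hno (prefix_drop_infix (by omega) hpre)
      · -- first occurrence is at or past length - m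
        have hne : i ≠ -1 := by
          intro h; rw [h] at h1; simp at h1; omega
        obtain ⟨hge, hpre, hmin⟩ := ccNext_spec hs hne
        refine (ccRef_of_no_match ?_).symm
        intro j hj hpj
        obtain ⟨k, hk, hjk⟩ := List.mem_range'.mp hj
        have h0i : (0:Int) ≤ i := le_trans (by positivity) hge
        exact hmin j (by omega) (by omega) hpj
    · rw [if_neg h1]
      push_neg at h1
      obtain ⟨hne, hlt⟩ := h1
      obtain ⟨hge, hpre, hmin⟩ := ccNext_spec hs hne
      have h0i : (0:Int) ≤ i := le_trans (by positivity) hge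
      set q := i.toNat with hq
      have hiq : i = (q : Int) := by omega
      have hqK : q < cs.length - m := by omega
      have hsq : start ≤ q := by omega
      have hsplit : List.range' start (cs.length - m - start)
          = List.range' start (q - start)
            ++ q :: List.range' (q+1) (cs.length - m - (q+1)) := by
        have h : List.range' start (q - start) 1 ++ List.range' (start + 1 * (q - start)) (cs.length - m - q) 1
            = List.range' start ((q - start) + (cs.length - m - q)) 1 := List.range'_append
        rw [show start + 1 * (q - start) = q by omega] at h
        rw [show (q - start) + (cs.length - m - q) = cs.length - m - start by omega] at h
        rw [← h]
        congr 1
        rw [show cs.length - m - q = (cs.length - m - (q+1)) + 1 by omega, List.range'_succ]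
      rw [hsplit]
      unfold ccRef
      rw [List.foldl_append]
      rw [show List.foldl _ (l, r) (List.range' start (q - start)) = (l, r) from
        ccRef_of_no_match (fun j hj hpj => by
          obtain ⟨k, hk, hjk⟩ := List.mem_range'.mp hj
          exact hmin j (by omega) (by omega) hpj)]
      rw [List.foldl_cons]
      rw [if_pos (show comb <+: cs.drop q from hpre)]
      rw [show i + (m : Int) = ((q + m : Nat) : Int) by omega]
      rw [PySem.List.pyGetD_natCast]
      simp only [beq_iff_eq]
      by_cases hc : cs.getD (q + m) ' ' = '2'
      · rw [if_pos hc, if_pos hc]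
        have := ih (q+1) (l+1) r (by omega) (by omega)
        unfold ccRef at this
        exact this
      · rw [if_neg hc, if_neg hc]
        have := ih (q+1) l (r+1) (by omega) (by omega)
        unfold ccRef at this
        exact this

theorem take_drop_eq_iff_prefix (cs comb : List Char) (j m : Nat) (hlen : comb.length = m) :
    ((cs.drop j).take m = comb) ↔ comb <+: cs.drop j := by
  constructor
  · intro h; rw [← h]; exact List.take_prefix m _
  · intro h
    rw [List.prefix_iff_eq_take.mp h, hlen]

theorem choice_counting_A_eq_ccRef (cs : List Char) (m : Nat) (hm : 0 < m) (hmn : m < cs.length) :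
    ((PySem.List.pyRange 0 ((cs.length : Int) - (m : Int)) 1).foldl
      (fun (p : Int × Int) i =>
        if PySem.List.slice cs (some i) (some (i + (m : Int))) == cs.drop (cs.length - m) then
          (if PySem.List.pyGetD cs (i + (m : Int)) ' ' == '2' then (p.1 + 1, p.2) else (p.1, p.2 + 1))
        else p)
      (0, 0))
      = ccRef cs (cs.drop (cs.length - m)) m (List.range' 0 (cs.length - m)) 0 0 := by
  have hcast : (cs.length : Int) - (m : Int) = ((cs.length - m : Nat) : Int) := by omega
  rw [hcast, PySem.List.pyRange_one, List.foldl_map]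
  have hlen : (cs.drop (cs.length - m)).length = m := by
    rw [List.length_drop]; omega
  rw [show ((((cs.length - m : Nat) : Int)) - 0).toNat = cs.length - m by omega]
  rw [List.range_eq_range']
  unfold ccRef
  refine PySem.List.foldl_congr_mem _ _ _ _ ?_
  intro acc y hy
  obtain ⟨k, hk, hyk⟩ := List.mem_range'.mp hy
  have h1 : (0 : Int) + (y : Int) = ((y : Nat) : Int) := by omega
  have h2 : (0 : Int) + (y : Int) + (m : Int) = (((y + m : Nat)) : Int) := by omega
  rw [h2, h1, PySem.List.pyGetD_natCast]
  rw [show (some (((y + m : Nat)) : Int)) = some (((y:Nat) : Int) + ((m:Nat) : Int)) by push_cast; ring_nf]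
  rw [PySem.List.slice_natCast_add]
  simp only [beq_iff_eq, List.getD_eq_getElem?_getD]
  by_cases hp : cs.drop (cs.length - m) <+: cs.drop y
  · rw [if_pos ((take_drop_eq_iff_prefix cs _ y m hlen).mpr hp), if_pos hp]
  · rw [if_neg (fun h => hp ((take_drop_eq_iff_prefix cs _ y m hlen).mp h)), if_neg hp]

theorem count_singleton_go (c : Char) :
    ∀ (cs : List Char) (fuel acc : Nat), cs.length ≤ fuel →
    PySem.Chars.count.go [c] fuel cs acc = acc + cs.count c := by
  intro cs
  induction cs with
  | nil => intro fuel acc h; cases fuel <;> simp [PySem.Chars.count.go]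
  | cons x t ih =>
    intro fuel acc h
    cases fuel with
    | zero => simp at h
    | succ f =>
      simp only [PySem.Chars.count.go]
      have hp : List.isPrefixOf [c] (x :: t) = (c == x) := by simp [List.isPrefixOf]
      by_cases hx : c = x
      · subst hx
        rw [if_pos (by simp [hp])]
        simp only [List.length_cons, List.drop_succ_cons, List.length_nil, List.drop_zero]
        rw [ih f (acc+1) (by simpa using Nat.le_of_succ_le_succ h)]
        simp
        omega
      · rw [if_neg (by simp [hp, hx])]
        rw [ih f acc (by simpa using Nat.le_of_succ_le_succ h)]
        simp [Ne.symm hx]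

theorem count_singleton (cs : List Char) (c : Char) :
    PySem.Chars.count cs [c] = cs.count c := by
  unfold PySem.Chars.count
  rw [if_neg (by simp)]
  simpa using count_singleton_go c cs cs.length 0 le_rfl

theorem zeroBranch (cs : List Char) : ∀ (a b : Int),
    cs.foldl (fun (p : Int × Int) c => if c == '2' then (p.1 + 1, p.2) else (p.1, p.2 + 1)) (a, b)
      = (a + cs.count '2', b + ((cs.length : Int) - cs.count '2')) := by
  induction cs with
  | nil => intro a b; simp
  | cons x t ih =>
    intro a b
    simp only [List.foldl_cons, List.count_cons, List.length_cons]
    by_cases hx : x = '2'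
    · rw [if_pos (by simp [hx]), ih]
      refine Prod.ext ?_ ?_ <;> simp [hx] <;> push_cast <;> omega
    · rw [if_neg (by simp [hx]), ih]
      refine Prod.ext ?_ ?_ <;> simp [hx] <;> push_cast <;> omega

-- zeta-free restatements of the two ports (definitional equalities, proved by rfl)
theorem choice_counting_eq (s : String) (num : Int) :
    choice_counting s num
      = (if num == 0 then
          [((PySem.List.pyRange 0 (s.toList.length : Int) 1).foldl
              (fun (p : Int × Int) i =>
                if PySem.List.pyGetD s.toList i ' ' == '2' then (p.1 + 1, p.2) else (p.1, p.2 + 1))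
              (0, 0)).1,
            ((PySem.List.pyRange 0 (s.toList.length : Int) 1).foldl
              (fun (p : Int × Int) i =>
                if PySem.List.pyGetD s.toList i ' ' == '2' then (p.1 + 1, p.2) else (p.1, p.2 + 1))
              (0, 0)).2]
        else
          [((PySem.List.pyRange 0 ((s.toList.length : Int) - num) 1).foldl
              (fun (p : Int × Int) i =>
                if PySem.List.slice s.toList (some i) (some (i + num)) == PySem.List.slice s.toList (some (-num)) none then
                  (if PySem.List.pyGetD s.toList (i + num) ' ' == '2' then (p.1 + 1, p.2) else (p.1, p.2 + 1))
                else p)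
              (0, 0)).1,
            ((PySem.List.pyRange 0 ((s.toList.length : Int) - num) 1).foldl
              (fun (p : Int × Int) i =>
                if PySem.List.slice s.toList (some i) (some (i + num)) == PySem.List.slice s.toList (some (-num)) none then
                  (if PySem.List.pyGetD s.toList (i + num) ' ' == '2' then (p.1 + 1, p.2) else (p.1, p.2 + 1))
                else p)
              (0, 0)).2]) := rfl

theorem choice_counting_alt_eq (s : String) (num : Int) :
    choice_counting_alt s num
      = (if num == 0 then
          [(PySem.Chars.count s.toList ['2'] : Int),
            (s.toList.length : Int) - (PySem.Chars.count s.toList ['2'] : Int)]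
        else
          [(ccAltLoop s.toList (PySem.List.slice s.toList (some (-num)) none) num (s.toList.length + 1) 0 0 0).1,
            (ccAltLoop s.toList (PySem.List.slice s.toList (some (-num)) none) num (s.toList.length + 1) 0 0 0).2]) := rfl

-- ===== VERDICT (by name: the statement is the Claim_ definition above) =====
theorem choice_counting_spec : Claim_equal_choice_counting := by
  intro s num hdom hpre
  unfold Spec_choice_counting
  rw [choice_counting_eq, choice_counting_alt_eq]
  set cs := s.toList with hcs
  by_cases hnum : num = 0
  · rw [if_pos (by simp [hnum]), if_pos (by simp [hnum])]
    rw [PySem.List.foldl_pyRange_zero_pyGetD' cs ' '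
      (fun (p : Int × Int) c => if c == '2' then (p.1 + 1, p.2) else (p.1, p.2 + 1)) (0, 0)]
    rw [zeroBranch cs 0 0, count_singleton]
    simp
  · rw [if_neg (by simp [hnum]), if_neg (by simp [hnum])]
    have h0 : 0 < num := lt_of_le_of_ne hpre (Ne.symm hnum)
    set m := num.toNat with hmdef
    have hnum' : num = (m : Int) := by omega
    have hm : 0 < m := by omega
    have hcomb : PySem.List.slice cs (some (-num)) none = cs.drop (cs.length - m) := by
      rw [hnum']
      exact PySem.List.slice_from_neg_natCast cs m hm
    rw [hcomb]
    by_cases hmn : m < cs.length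
    · rw [hnum', choice_counting_A_eq_ccRef cs m hm hmn]
      rw [ccAltLoop_eq_ccRef cs _ m hm hmn (cs.length + 1) 0 0 0 (by omega) (by omega)]
      simp
    · -- m ≥ length: the loop range is empty and B's loop breaks at once
      rw [show PySem.List.pyRange 0 ((cs.length : Int) - num) 1 = [] from
        PySem.List.pyRange_one_eq_nil (by omega)]
      simp only [List.foldl_nil]
      have hdropz : cs.drop (cs.length - m) = cs := by
        rw [show cs.length - m = 0 by omega, List.drop_zero]
      rw [hdropz]
      rw [ccAltLoop_succ]
      rw [show ccNext cs cs 0 = 0 from by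
        unfold ccNext
        rw [if_pos (List.isPrefixOf_iff_prefix.mpr (by simp))]
        simp]
      rw [if_pos (Or.inr (by omega))]
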